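-- pv_equiv track=rewrite | github.com/Chenkehan21/FloorPlan-VLN | FloorPlan-VLN-Dataset/rebalance_actions.py | pad_locations
-- ===== SOURCE A (Python) =====
-- from typing import List, Tuple
--
-- def pad_locations(locations: List, actions: List) -> List:
--     padded_locations = []
--     padded_locations.append(locations[0]) # start position
--     i = 0
--     for action in actions:
--         if action == 1:
--             i += 1
--         padded_locations.append(locations[i])
--
--     return padded_locations
-- ===== SOURCE B (Python) =====
-- def pad_locations(locations, actions):
--     # Run-length view: split actions into runs ending at each action==1;
--     # the j-th location is emitted once per step of the j-th run (plus the start).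
--     runs = [1]
--     for a in actions:
--         if a == 1:
--             runs.append(1)
--         else:
--             runs[-1] += 1
--     out = []
--     for loc, n in zip(locations, runs):
--         out.extend([loc] * n)
--     return out
-- ===== Notes on version B (the rewrite author's own statement) =====
-- stated objective: alternative
-- what changed: B never threads an index into locations: it run-length-encodes the action sequence (one run per stretch ending at an action==1), then zips locations with the run lengths and replicates each location by its run length.
import Mathlib
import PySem

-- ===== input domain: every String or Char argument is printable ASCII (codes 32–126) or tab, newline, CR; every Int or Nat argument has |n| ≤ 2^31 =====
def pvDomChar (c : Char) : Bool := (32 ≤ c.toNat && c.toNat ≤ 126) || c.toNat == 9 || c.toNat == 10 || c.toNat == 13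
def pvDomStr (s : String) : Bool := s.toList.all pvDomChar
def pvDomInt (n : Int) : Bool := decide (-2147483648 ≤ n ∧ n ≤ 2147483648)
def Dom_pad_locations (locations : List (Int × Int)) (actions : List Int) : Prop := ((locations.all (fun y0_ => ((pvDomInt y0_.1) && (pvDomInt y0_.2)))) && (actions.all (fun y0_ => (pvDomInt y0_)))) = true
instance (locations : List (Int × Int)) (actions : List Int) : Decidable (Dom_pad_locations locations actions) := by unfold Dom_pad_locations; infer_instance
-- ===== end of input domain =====

-- B run-length-encodes the action sequence and replicates each location by its run length,
-- instead of A's loop threading a running index into locations (objective: alternative, same cost).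

-- ===== PORT A =====
-- A's loop: thread the running index i, append locations[i] after each step.
-- (locations[i] is PySem.List.pyGet?; the .getD (0,0) only fires where Python raises IndexError,
--  which Pre_pad_locations excludes.)
def pvPadLoopA (locations : List (Int × Int)) (acc : List (Int × Int)) (i : Int) :
    List Int → List (Int × Int)
  | [] => acc
  | a :: rest =>
      let i' := if a = 1 then i + 1 else i
      pvPadLoopA locations (acc ++ [(PySem.List.pyGet? locations i').getD (0, 0)]) i' rest

def pad_locations (locations : List (Int × Int)) (actions : List Int) : List (Int × Int) :=
  pvPadLoopA locations [(PySem.List.pyGet? locations 0).getD (0, 0)] 0 actions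

-- ===== PORT B =====
-- runs = [1]; for a in actions: runs.append(1) if a == 1 else runs[-1] += 1
-- ('runs[-1] += 1' is ported step for step as dropLast ++ [last + 1], exact since runs is nonempty)
def pvBuildRuns (runs : List Int) : List Int → List Int
  | [] => runs
  | a :: rest =>
      if a = 1 then pvBuildRuns (runs ++ [1]) rest
      else pvBuildRuns (runs.dropLast ++ [((PySem.List.pyGet? runs (-1)).getD 0) + 1]) rest

-- out = []; for loc, n in zip(locations, runs): out.extend([loc] * n)
def pad_locations_alt (locations : List (Int × Int)) (actions : List Int) : List (Int × Int) :=
  (locations.zip (pvBuildRuns [1] actions)).foldl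
    (fun out p => out ++ List.replicate p.2.toNat p.1) []

-- ===== PRECONDITION & SPEC =====
-- Pre_ excludes exactly the inputs where the Python A raises IndexError: the running index
-- reaches at most (number of actions equal to 1), so all lookups are in range iff that
-- count is < len(locations) (this also forces locations nonempty).
def Pre_pad_locations (locations : List (Int × Int)) (actions : List Int) : Prop :=
  actions.count 1 < locations.length
instance (locations : List (Int × Int)) (actions : List Int) : Decidable (Pre_pad_locations locations actions) := by unfold Pre_pad_locations; infer_instance

def pvWitness_pad_locations : (List (Int × Int)) × List Int := ([(0, 0), (1, 1)], [1, 0])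

def Spec_pad_locations (locations : List (Int × Int)) (actions : List Int) (out : List (Int × Int)) : Prop := out = pad_locations_alt locations actions
instance (locations : List (Int × Int)) (actions : List Int) (out : List (Int × Int)) : Decidable (Spec_pad_locations locations actions out) := by unfold Spec_pad_locations; infer_instance

-- ===== CLAIM (what is proved, stated in full; the proofs are below) =====
def Claim_equal_pad_locations : Prop := ∀ (locations : List (Int × Int)) (actions : List Int), Dom_pad_locations locations actions → Pre_pad_locations locations actions → Spec_pad_locations locations actions (pad_locations locations actions)

-- ===== LEMMAS AND PROOFS =====

-- The stream of indices A looks up after a start index i.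
def pvSuffix (i : Int) : List Int → List Int
  | [] => []
  | a :: rest =>
      let i' := i + (if a = 1 then 1 else 0)
      i' :: pvSuffix i' rest

theorem pvPadLoopA_eq (locations : List (Int × Int)) (acts : List Int) :
    ∀ (acc : List (Int × Int)) (i : Int),
      pvPadLoopA locations acc i acts
        = acc ++ (pvSuffix i acts).map (fun j => (PySem.List.pyGet? locations j).getD (0, 0)) := by
  induction acts with
  | nil => intro acc i; simp [pvPadLoopA, pvSuffix]
  | cons a rest ih =>
      intro acc i
      simp only [pvPadLoopA, pvSuffix, ih, List.map_cons, List.append_assoc,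
        List.singleton_append]
      by_cases h : a = 1 <;> simp [h]

theorem pvLast_get (ys : List Int) (i : Int) :
    ((PySem.List.pyGet? (ys ++ [i]) (-1)).getD 0) = i := by
  simp [PySem.List.pyGet?, PySem.List.pyIdx?]

-- Closed-run stream produced by B's first loop, with c the currently open run.
def pvRuns (c : Int) : List Int → List Int
  | [] => [c]
  | a :: rest => if a = 1 then c :: pvRuns 1 rest else pvRuns (c + 1) rest

theorem pvBuildRuns_eq (acts : List Int) :
    ∀ (ys : List Int) (c : Int),
      pvBuildRuns (ys ++ [c]) acts = ys ++ pvRuns c acts := by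
  induction acts with
  | nil => intro ys c; simp [pvBuildRuns, pvRuns]
  | cons a rest ih =>
      intro ys c
      by_cases h : a = 1
      · rw [pvBuildRuns, if_pos h, show (ys ++ [c]) ++ [(1 : Int)] = (ys ++ [c]) ++ [1] from rfl,
          ih (ys ++ [c]) 1, pvRuns, if_pos h]
        simp
      · rw [pvBuildRuns, if_neg h, pvLast_get, List.dropLast_concat, ih ys (c + 1),
          pvRuns, if_neg h]

-- The core correspondence: replicating locations along the runs equals A's lookup stream.
theorem pvKey (locations : List (Int × Int)) (acts : List Int) :
    ∀ (i : Nat) (c : Int), 1 ≤ c → i + acts.count 1 < locations.length →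
      ((locations.drop i).zip (pvRuns c acts)).flatMap
          (fun p => List.replicate p.2.toNat p.1)
        = List.replicate c.toNat ((PySem.List.pyGet? locations (i : Int)).getD (0, 0))
          ++ (pvSuffix (i : Int) acts).map
              (fun j => (PySem.List.pyGet? locations j).getD (0, 0)) := by
  induction acts with
  | nil =>
      intro i c hc hlen
      simp only [List.count_nil, Nat.add_zero] at hlen
      rw [pvRuns, List.drop_eq_getElem_cons hlen, List.zip_cons_cons, List.zip_nil_right,
        List.flatMap_cons]
      simp [pvSuffix, hlen]
  | cons a rest ih =>
      intro i c hc hlen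
      by_cases h : a = 1
      · subst h
        have hcnt : (1 :: rest).count (1 : Int) = rest.count 1 + 1 := by
          simp
        rw [hcnt] at hlen
        have hi : i < locations.length := by omega
        have hrec := ih (i + 1) 1 le_rfl (by omega)
        rw [pvRuns, if_pos rfl, List.drop_eq_getElem_cons hi]
        simp only [List.zip_cons_cons, List.flatMap_cons, hrec]
        have : pvSuffix (i : Int) (1 :: rest)
            = ((i + 1 : Nat) : Int) :: pvSuffix ((i + 1 : Nat) : Int) rest := by
          simp [pvSuffix]
        rw [this]
        simp [hi]
      · have hcnt : (a :: rest).count (1 : Int) = rest.count 1 := by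
          simp [h]
        rw [hcnt] at hlen
        have hrec := ih i (c + 1) (by omega) hlen
        rw [pvRuns, if_neg h, hrec]
        have hrep : (c + 1).toNat = c.toNat + 1 := by omega
        have : pvSuffix (i : Int) (a :: rest) = (i : Int) :: pvSuffix (i : Int) rest := by
          simp [pvSuffix, h]
        rw [this, hrep, List.replicate_succ']
        simp

-- ===== VERDICT (by name: the statement is the Claim_ definition above) =====
theorem pad_locations_spec : Claim_equal_pad_locations := by
  intro locations actions _ hpre
  unfold Spec_pad_locations pad_locations pad_locations_alt
  rw [pvPadLoopA_eq, PySem.List.foldl_append_eq_flatMap,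
    show ([1] : List Int) = [] ++ [(1 : Int)] by simp, pvBuildRuns_eq]
  have hkey := pvKey locations actions 0 1 le_rfl (by simpa using hpre)
  simp only [List.drop_zero, List.nil_append] at hkey ⊢
  rw [hkey]
  simp
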